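-- pv_equiv track=rewrite | github.com/Nico404/ywl | src/utils/cleaning.py | body_cleaning
-- ===== SOURCE A (Python) =====
-- import string
--
-- def body_cleaning(body, to_strip=True, to_lower=True, del_numbers=True, del_punctuation=True):
--     """
--     Cleans the body of a text by removing whitespaces, lowercasing, removing numbers and punctuation
--     """
--     # Removing whitespaces
--     if to_strip == True: body = body.strip()
--
--     # Lowercasing
--     if to_lower == True: body = body.lower()
--
--     # Removing numbers
--     if del_numbers == True: body = ''.join(char for char in body if not char.isdigit())
--
--     # Removing punctuation
--     if del_punctuation == True:
--         for punctuation in string.punctuation: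
--             body = body.replace(punctuation, '')
--
--     return body
-- ===== SOURCE B (Python) =====
-- import string
--
-- def body_cleaning(body, to_strip=True, to_lower=True, del_numbers=True, del_punctuation=True):
--     """Single-pass cleaner: strip/lower, then one join over the text instead of
--     a digit comprehension plus 32 full-string replace passes."""
--     if to_strip == True: body = body.strip()
--     if to_lower == True: body = body.lower()
--     punct = set(string.punctuation)
--     return ''.join(ch for ch in body
--                    if not ((del_numbers == True and ch.isdigit())
--                            or (del_punctuation == True and ch in punct)))
-- ===== Notes on version B (the rewrite author's own statement) =====
-- stated objective: simpler
-- what changed: Replaces A's separate digit comprehension plus a per-punctuation-character str.replace loop (33 full string rebuilds) with one single-pass join that keeps a character unless it is a deleted digit or in a precomputed punctuation set.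
import Mathlib
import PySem

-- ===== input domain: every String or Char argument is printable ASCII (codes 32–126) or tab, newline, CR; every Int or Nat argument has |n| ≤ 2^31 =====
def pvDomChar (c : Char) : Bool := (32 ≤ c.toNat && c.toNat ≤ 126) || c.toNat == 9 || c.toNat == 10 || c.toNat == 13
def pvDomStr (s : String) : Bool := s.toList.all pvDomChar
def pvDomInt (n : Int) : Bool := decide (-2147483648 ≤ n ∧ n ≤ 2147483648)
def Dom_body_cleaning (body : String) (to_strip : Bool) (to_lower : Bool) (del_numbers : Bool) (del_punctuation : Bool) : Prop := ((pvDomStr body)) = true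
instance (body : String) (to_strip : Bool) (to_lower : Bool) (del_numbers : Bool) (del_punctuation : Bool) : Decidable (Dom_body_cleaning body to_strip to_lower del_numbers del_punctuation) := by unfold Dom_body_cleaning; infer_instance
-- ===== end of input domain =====

-- B replaces A's digit comprehension plus 33 per-punctuation str.replace passes by one
-- filtering pass with a punctuation set (objective: simpler single-pass decomposition).

-- string.punctuation
def pyPunct : List Char := "!\"#$%&'()*+,-./:;<=>?@[\\]^_`{|}~".toList

-- ===== PORT A =====
def body_cleaning (body : String) (to_strip : Bool) (to_lower : Bool) (del_numbers : Bool) (del_punctuation : Bool) : String :=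
  -- if to_strip == True: body = body.strip()
  let body := if to_strip == true then PySem.Str.strip body else body
  -- if to_lower == True: body = body.lower()
  let body := if to_lower == true then PySem.Str.lower body else body
  -- if del_numbers == True: body = ''.join(char for char in body if not char.isdigit())
  let body := if del_numbers == true then String.ofList (body.toList.filter (fun c => !(PySem.Chars.isdigit c))) else body
  -- if del_punctuation == True: for punctuation in string.punctuation: body = body.replace(punctuation, '')
  let body := if del_punctuation == true then pyPunct.foldl (fun b p => PySem.Str.replace b (String.ofList [p]) "") body else body
  body

-- ===== PORT B =====
-- punct = set(string.punctuation)
def punctSet : PySem.Set Char := PySem.Set.ofList pyPunct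

def body_cleaning_alt (body : String) (to_strip : Bool) (to_lower : Bool) (del_numbers : Bool) (del_punctuation : Bool) : String :=
  let body := if to_strip == true then PySem.Str.strip body else body
  let body := if to_lower == true then PySem.Str.lower body else body
  -- ''.join(ch for ch in body if not ((del_numbers == True and ch.isdigit()) or (del_punctuation == True and ch in punct)))
  String.ofList (body.toList.filter
    (fun c => !((del_numbers == true && PySem.Chars.isdigit c)
                || (del_punctuation == true && PySem.Set.contains punctSet c))))

-- ===== PRECONDITION & SPEC =====
def Spec_body_cleaning (body : String) (to_strip : Bool) (to_lower : Bool) (del_numbers : Bool) (del_punctuation : Bool) (out : String) : Prop := out = body_cleaning_alt body to_strip to_lower del_numbers del_punctuation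
instance (body : String) (to_strip : Bool) (to_lower : Bool) (del_numbers : Bool) (del_punctuation : Bool) (out : String) : Decidable (Spec_body_cleaning body to_strip to_lower del_numbers del_punctuation out) := by unfold Spec_body_cleaning; infer_instance

-- ===== CLAIM (what is proved, stated in full; the proofs are below) =====
def Claim_equal_body_cleaning : Prop := ∀ (body : String) (to_strip : Bool) (to_lower : Bool) (del_numbers : Bool) (del_punctuation : Bool), Dom_body_cleaning body to_strip to_lower del_numbers del_punctuation → Spec_body_cleaning body to_strip to_lower del_numbers del_punctuation (body_cleaning body to_strip to_lower del_numbers del_punctuation)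

-- ===== LEMMAS AND PROOFS =====

-- replace with a single-character pattern and empty replacement is a filter
theorem go_filter (p : Char) : ∀ (fuel : Nat) (l acc : List Char), l.length ≤ fuel →
    PySem.Chars.replace.go [p] [] fuel l acc = acc.reverse ++ l.filter (fun c => !(c == p)) := by
  intro fuel
  induction fuel with
  | zero =>
    intro l acc h
    cases l with
    | nil => simp [PySem.Chars.replace.go]
    | cons c t => simp at h
  | succ n ih =>
    intro l acc h
    cases l with
    | nil => simp [PySem.Chars.replace.go]
    | cons c t =>
      by_cases hc : c = p
      · subst hc
        have : PySem.Chars.replace.go [c] [] (n+1) (c :: t) acc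
            = PySem.Chars.replace.go [c] [] n t acc := by
          simp [PySem.Chars.replace.go, List.isPrefixOf]
        rw [this, ih t acc (by simpa using Nat.le_of_succ_le_succ (by simpa using h))]
        simp
      · have hpc : (p == c) = false := by
          simp; exact fun h => hc h.symm
        have : PySem.Chars.replace.go [p] [] (n+1) (c :: t) acc
            = PySem.Chars.replace.go [p] [] n t (c :: acc) := by
          simp [PySem.Chars.replace.go, List.isPrefixOf, hpc]
        rw [this, ih t (c :: acc) (by simpa using Nat.le_of_succ_le_succ (by simpa using h))]
        simp [hc]

theorem replace_single (p : Char) (l : List Char) :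
    PySem.Chars.replace l [p] [] = l.filter (fun c => !(c == p)) := by
  have : PySem.Chars.replace l [p] [] = PySem.Chars.replace.go [p] [] l.length l [] := by
    simp [PySem.Chars.replace]
  rw [this, go_filter p l.length l [] le_rfl]
  simp

theorem foldl_replace_chars (ps : List Char) : ∀ l : List Char,
    ps.foldl (fun b q => PySem.Chars.replace b [q] []) l
      = l.filter (fun c => !(ps.contains c)) := by
  induction ps with
  | nil => intro l; simp
  | cons p ps ih =>
    intro l
    rw [List.foldl_cons, replace_single, ih, List.filter_filter]
    apply List.filter_congr
    intro a _
    by_cases h : a = p <;> simp [h, Bool.and_comm]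

theorem foldl_to_chars (ps : List Char) : ∀ s : String,
    ps.foldl (fun b q => PySem.Str.replace b (String.ofList [q]) "") s
      = String.ofList (ps.foldl (fun l q => PySem.Chars.replace l [q] []) s.toList) := by
  induction ps with
  | nil => intro s; simp
  | cons p ps ih =>
    intro s
    rw [List.foldl_cons, List.foldl_cons]
    have h1 : PySem.Str.replace s (String.ofList [p]) ""
        = String.ofList (PySem.Chars.replace s.toList [p] []) := by
      simp [PySem.Str.replace]
    rw [h1, ih]
    simp

theorem foldl_replace_str (ps : List Char) (s : String) :
    ps.foldl (fun b q => PySem.Str.replace b (String.ofList [q]) "") s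
      = String.ofList (s.toList.filter (fun c => !(ps.contains c))) := by
  rw [foldl_to_chars, foldl_replace_chars]

theorem punctSet_eq : punctSet = pyPunct := by decide

-- ===== VERDICT (by name: the statement is the Claim_ definition above) =====
theorem body_cleaning_spec : Claim_equal_body_cleaning := by
  intro body to_strip to_lower del_numbers del_punctuation _
  unfold Spec_body_cleaning body_cleaning body_cleaning_alt
  cases del_numbers <;> cases del_punctuation <;>
    simp [foldl_replace_str, punctSet_eq, List.filter_filter, Bool.not_or, Bool.and_comm]
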